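-- pv_equiv track=rewrite | github.com/lironT74/Lemida_2_project | auxiliary_functions.py | get_histories_and_corresponding_tags
-- ===== SOURCE A (Python) =====
-- BEGIN = '*B'
--
-- STOP = '*S'
--
-- def get_histories_and_corresponding_tags(x, y):
--     """
--     :return: Two lists, one of all histories, and the other of all tags in the file
--     """
--
--     histories = []
--     tags = []
--     for day, day_tags in zip(x, y):
--         for i in range(len(day)):
--             phour = day[i-1] if i > 0 else ([BEGIN] * len(day[0]))
--             chour = day[i]
--             nhour = day[i+1] if i < len(day) - 1 else ([STOP] * len(day[0]))
--             pptag = day_tags[i-2] if i > 1 else BEGIN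
--             ptag = day_tags[i-1] if i > 0 else BEGIN
--             ctag = day_tags[i]
--
--             history = (chour, pptag, ptag, phour, nhour)
--             histories.append(history)
--             tags.append(ctag)
--     return histories, tags
-- ===== SOURCE B (Python) =====
-- BEGIN = '*B'
--
-- STOP = '*S'
--
-- def get_histories_and_corresponding_tags(x, y):
--     """Single parallel scan over precomputed shifted sequences instead of offset indexing."""
--     histories = []
--     tags = []
--     for day, day_tags in zip(x, y):
--         if not day:
--             continue
--         w = len(day[0])
--         prev_hours = [[BEGIN] * w] + day[:-1]
--         next_hours = day[1:] + [[STOP] * w]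
--         pptags = [BEGIN, BEGIN] + day_tags[:-2]
--         ptags = [BEGIN] + day_tags[:-1]
--         for chour, pptag, ptag, phour, nhour, ctag in zip(day, pptags, ptags, prev_hours, next_hours, day_tags):
--             histories.append((chour, pptag, ptag, phour, nhour))
--             tags.append(ctag)
--     return histories, tags
-- ===== Notes on version B (the rewrite author's own statement) =====
-- stated objective: alternative
-- what changed: Replaces the i-2/i-1/i/i+1 index arithmetic inside a range loop by one parallel zip scan over precomputed padded shifted lists (prev/next hours, prev/prev-prev tags) per day.
import Mathlib
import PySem

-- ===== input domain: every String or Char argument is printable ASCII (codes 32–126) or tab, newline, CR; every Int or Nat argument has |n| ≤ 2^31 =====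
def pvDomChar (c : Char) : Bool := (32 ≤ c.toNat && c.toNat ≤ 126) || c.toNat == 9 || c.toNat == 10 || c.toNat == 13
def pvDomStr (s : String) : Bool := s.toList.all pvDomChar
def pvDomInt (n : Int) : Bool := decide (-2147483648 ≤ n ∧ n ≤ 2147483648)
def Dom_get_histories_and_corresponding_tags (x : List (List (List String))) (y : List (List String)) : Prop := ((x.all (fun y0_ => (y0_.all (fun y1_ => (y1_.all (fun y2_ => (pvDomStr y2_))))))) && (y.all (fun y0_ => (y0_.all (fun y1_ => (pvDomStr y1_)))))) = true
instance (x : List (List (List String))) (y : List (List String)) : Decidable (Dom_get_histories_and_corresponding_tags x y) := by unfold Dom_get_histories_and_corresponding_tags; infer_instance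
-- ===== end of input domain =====

-- B replaces A's i-2/i-1/i/i+1 index arithmetic inside a range loop by one parallel
-- scan over precomputed padded shifted lists per day (alternative decomposition, same cost).


-- ===== PORT A =====
def get_histories_and_corresponding_tags (x : List (List (List String))) (y : List (List String)) : (List (List String × String × String × List String × List String)) × List String :=
  (List.zip x y).foldl (fun acc dp =>
    let day := dp.1
    let day_tags := dp.2
    (PySem.List.pyRange 0 (day.length : Int) 1).foldl (fun acc2 i =>
      let phour := if i > 0 then PySem.List.pyGetD day (i - 1) [] else List.replicate (PySem.List.pyGetD day 0 []).length "*B"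
      let chour := PySem.List.pyGetD day i []
      let nhour := if i < (day.length : Int) - 1 then PySem.List.pyGetD day (i + 1) [] else List.replicate (PySem.List.pyGetD day 0 []).length "*S"
      let pptag := if i > 1 then PySem.List.pyGetD day_tags (i - 2) "" else "*B"
      let ptag := if i > 0 then PySem.List.pyGetD day_tags (i - 1) "" else "*B"
      let ctag := PySem.List.pyGetD day_tags i ""
      (acc2.1 ++ [(chour, pptag, ptag, phour, nhour)], acc2.2 ++ [ctag])
    ) acc
  ) ([], [])

-- ===== PORT B =====
-- the zip-of-six loop body of Source B: consume the six parallel lists simultaneously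
def pvBuildDay : List (List String) → List String → List String → List (List String) → List (List String) → List String →
    (List (List String × String × String × List String × List String)) × List String
  | ch :: day, pp :: pps, p :: ps, ph :: phs, nh :: nhs, ct :: cts =>
      let rest := pvBuildDay day pps ps phs nhs cts
      ((ch, pp, p, ph, nh) :: rest.1, ct :: rest.2)
  | _, _, _, _, _, _ => ([], [])

def get_histories_and_corresponding_tags_alt (x : List (List (List String))) (y : List (List String)) : (List (List String × String × String × List String × List String)) × List String :=
  (List.zip x y).foldl (fun acc dp =>
    let day := dp.1
    let day_tags := dp.2
    if day = [] then acc else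
    let w := (day.headD []).length
    let prev_hours := List.replicate w "*B" :: day.dropLast       -- [[BEGIN]*w] + day[:-1]
    let next_hours := day.drop 1 ++ [List.replicate w "*S"]       -- day[1:] + [[STOP]*w]
    let pptags := "*B" :: "*B" :: day_tags.dropLast.dropLast      -- [BEGIN, BEGIN] + day_tags[:-2]
    let ptags := "*B" :: day_tags.dropLast                        -- [BEGIN] + day_tags[:-1]
    let r := pvBuildDay day pptags ptags prev_hours next_hours day_tags
    (acc.1 ++ r.1, acc.2 ++ r.2)
  ) ([], [])

-- ===== PRECONDITION & SPEC =====
-- Pre_ excludes exactly the inputs where A raises IndexError: a zipped day with fewer tags than hours.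
def Pre_get_histories_and_corresponding_tags (x : List (List (List String))) (y : List (List String)) : Prop :=
  ∀ p ∈ List.zip x y, p.1.length ≤ p.2.length
instance (x : List (List (List String))) (y : List (List String)) : Decidable (Pre_get_histories_and_corresponding_tags x y) := by unfold Pre_get_histories_and_corresponding_tags; infer_instance

def pvWitness_get_histories_and_corresponding_tags : List (List (List String)) × List (List String) :=
  ([[["a"], ["b"]]], [["t", "u"]])

def Spec_get_histories_and_corresponding_tags (x : List (List (List String))) (y : List (List String)) (out : (List (List String × String × String × List String × List String)) × List String) : Prop := out = get_histories_and_corresponding_tags_alt x y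
instance (x : List (List (List String))) (y : List (List String)) (out : (List (List String × String × String × List String × List String)) × List String) : Decidable (Spec_get_histories_and_corresponding_tags x y out) := by
  unfold Spec_get_histories_and_corresponding_tags
  exact @instDecidableEqProd _ _ (@instDecidableEqList _ (by infer_instance)) (by infer_instance) _ _

-- ===== CLAIM (what is proved, stated in full; the proofs are below) =====
def Claim_equal_get_histories_and_corresponding_tags : Prop := ∀ (x : List (List (List String))) (y : List (List String)), Dom_get_histories_and_corresponding_tags x y → Pre_get_histories_and_corresponding_tags x y → Spec_get_histories_and_corresponding_tags x y (get_histories_and_corresponding_tags x y)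

-- ===== LEMMAS AND PROOFS =====

-- A pair-of-lists foldl that appends one element to each component is acc ++ map.
theorem pvFoldlPairAppend {ι α β : Type} (l : List ι) (f : ι → α) (g : ι → β)
    (acc : List α × List β) :
    l.foldl (fun a i => (a.1 ++ [f i], a.2 ++ [g i])) acc = (acc.1 ++ l.map f, acc.2 ++ l.map g) := by
  induction l generalizing acc with
  | nil => simp
  | cons h t ih => simp [List.foldl_cons, ih]

theorem pvGetD_dropLast {α : Type} (l : List α) (i : Nat) (d : α) (h : i < l.length - 1) :
    l.dropLast.getD i d = l.getD i d := by
  have h1 : i < l.dropLast.length := by simpa using h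
  have h2 : i < l.length := by omega
  rw [List.getD_eq_getElem?_getD, List.getD_eq_getElem?_getD,
    List.getElem?_eq_getElem h1, List.getElem?_eq_getElem h2]
  simp [List.getElem_dropLast]

theorem pvGetD_drop_one {α : Type} (l : List α) (i : Nat) (d : α) :
    (l.drop 1).getD i d = l.getD (i + 1) d := by
  rw [List.getD_eq_getElem?_getD, List.getD_eq_getElem?_getD, List.getElem?_drop, Nat.add_comm]

theorem pvGetD_concat_length {α : Type} (l : List α) (x d : α) :
    (l ++ [x]).getD l.length d = x := by
  rw [List.getD_eq_getElem?_getD, List.getElem?_concat_length]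
  rfl

-- pvBuildDay on parallel lists all of length ≥ the first is the map over indices.
theorem pvBuildDay_eq (a : List (List String)) : ∀ (b c : List String) (d e : List (List String)) (f : List String),
    a.length ≤ b.length → a.length ≤ c.length → a.length ≤ d.length → a.length ≤ e.length → a.length ≤ f.length →
    pvBuildDay a b c d e f =
      ((List.range a.length).map (fun k => (a.getD k [], b.getD k "", c.getD k "", d.getD k [], e.getD k [])),
       (List.range a.length).map (fun k => f.getD k "")) := by
  induction a with
  | nil => intro b c d e f _ _ _ _ _; simp [pvBuildDay]
  | cons h t ih =>
    intro b c d e f hb hc hd he hf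
    cases b with
    | nil => simp at hb
    | cons b0 bs =>
    cases c with
    | nil => simp at hc
    | cons c0 cs =>
    cases d with
    | nil => simp at hd
    | cons d0 ds =>
    cases e with
    | nil => simp at he
    | cons e0 es =>
    cases f with
    | nil => simp at hf
    | cons f0 fs =>
    simp only [pvBuildDay]
    rw [ih bs cs ds es fs (by simpa using hb) (by simpa using hc) (by simpa using hd)
      (by simpa using he) (by simpa using hf)]
    simp [List.range_succ_eq_map, List.map_map, Function.comp_def]

-- A's per-day loop equals B's per-day block, given enough tags.
theorem pvDay_eq (day : List (List String)) (dt : List String)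
    (hlen : day.length ≤ dt.length)
    (acc : (List (List String × String × String × List String × List String)) × List String) :
    (PySem.List.pyRange 0 (day.length : Int) 1).foldl (fun acc2 i =>
      (acc2.1 ++ [(PySem.List.pyGetD day i [],
        (if i > 1 then PySem.List.pyGetD dt (i - 2) "" else "*B"),
        (if i > 0 then PySem.List.pyGetD dt (i - 1) "" else "*B"),
        (if i > 0 then PySem.List.pyGetD day (i - 1) [] else List.replicate (PySem.List.pyGetD day 0 []).length "*B"),
        (if i < (day.length : Int) - 1 then PySem.List.pyGetD day (i + 1) [] else List.replicate (PySem.List.pyGetD day 0 []).length "*S"))],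
       acc2.2 ++ [PySem.List.pyGetD dt i ""])) acc =
    (if day = [] then acc else
      ((acc.1 ++ (pvBuildDay day ("*B" :: "*B" :: dt.dropLast.dropLast) ("*B" :: dt.dropLast)
          (List.replicate (day.headD []).length "*B" :: day.dropLast)
          (day.drop 1 ++ [List.replicate (day.headD []).length "*S"]) dt).1,
        acc.2 ++ (pvBuildDay day ("*B" :: "*B" :: dt.dropLast.dropLast) ("*B" :: dt.dropLast)
          (List.replicate (day.headD []).length "*B" :: day.dropLast)
          (day.drop 1 ++ [List.replicate (day.headD []).length "*S"]) dt).2))) := by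
  cases day with
  | nil =>
    simp [PySem.List.pyRange_one_eq_nil]
  | cons h0 dtail =>
    rw [if_neg (by simp)]
    rw [pvFoldlPairAppend]
    rw [pvBuildDay_eq _ _ _ _ _ _ (by simp at hlen ⊢; omega) (by simp at hlen ⊢; omega)
      (by simp) (by simp) hlen]
    rw [PySem.List.pyRange_zero_nat, List.map_map, List.map_map]
    refine congrArg₂ Prod.mk (congrArg _ (List.map_congr_left fun k hk => ?_))
      (congrArg _ (List.map_congr_left fun k hk => ?_)) <;> rw [List.mem_range] at hk
    · -- histories component
      simp only [Function.comp_apply]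
      simp only [Prod.mk.injEq]
      refine ⟨?_, ?_, ?_, ?_, ?_⟩
      · simp [PySem.List.pyGetD_natCast]
      · -- pptag
        rcases k with _ | _ | k
        · simp
        · norm_num
        · rw [if_pos (by push_cast; omega)]
          have h2 : ((k + 1 + 1 : Nat) : Int) - 2 = ((k : Nat) : Int) := by push_cast; ring
          rw [h2, PySem.List.pyGetD_natCast]
          simp only [List.getD_cons_succ]
          rw [pvGetD_dropLast _ _ _ (by simp only [List.length_dropLast, List.length_cons] at hk hlen ⊢; omega),
            pvGetD_dropLast _ _ _ (by simp only [List.length_cons] at hk hlen ⊢; omega)]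
      · -- ptag
        rcases k with _ | k
        · simp
        · rw [if_pos (by push_cast; omega)]
          have h1 : ((k + 1 : Nat) : Int) - 1 = ((k : Nat) : Int) := by push_cast; ring
          rw [h1, PySem.List.pyGetD_natCast]
          simp only [List.getD_cons_succ]
          rw [pvGetD_dropLast _ _ _ (by simp only [List.length_cons] at hk hlen ⊢; omega)]
      · -- phour
        rcases k with _ | k
        · simp [PySem.List.pyGetD_zero_cons]
        · rw [if_pos (by push_cast; omega)]
          have h1 : ((k + 1 : Nat) : Int) - 1 = ((k : Nat) : Int) := by push_cast; ring
          rw [h1, PySem.List.pyGetD_natCast]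
          simp only [List.getD_cons_succ]
          rw [pvGetD_dropLast _ _ _ (by simp only [List.length_cons] at hk ⊢; omega)]
      · -- nhour
        by_cases hk1 : k < (h0 :: dtail).length - 1
        · rw [if_pos (by simp at hk1 ⊢; omega)]
          have h1 : ((k : Nat) : Int) + 1 = ((k + 1 : Nat) : Int) := by push_cast; ring
          rw [h1, PySem.List.pyGetD_natCast]
          have hk1' : k < dtail.length := by simp only [List.length_cons] at hk1; omega
          conv_rhs => rw [List.getD_eq_getElem?_getD,
            List.getElem?_append_left (by simp only [List.length_drop, List.length_cons]; omega)]
          rw [← List.getD_eq_getElem?_getD, pvGetD_drop_one]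
        · rw [if_neg (by simp at hk1 ⊢; omega)]
          have hkeq : ((h0 :: dtail).drop 1).length = k := by
            simp only [List.length_drop, List.length_cons] at hk hk1 ⊢; omega
          rw [← hkeq, pvGetD_concat_length]
          simp [PySem.List.pyGetD_zero_cons]
    · -- tags component
      simp [PySem.List.pyGetD_natCast]

-- ===== VERDICT (by name: the statement is the Claim_ definition above) =====
theorem get_histories_and_corresponding_tags_spec : Claim_equal_get_histories_and_corresponding_tags := by
  intro x y _ hpre
  unfold Spec_get_histories_and_corresponding_tags
  unfold get_histories_and_corresponding_tags get_histories_and_corresponding_tags_alt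
  refine PySem.List.foldl_congr_mem _ _ _ _ ?_
  intro acc dp hmem
  exact pvDay_eq dp.1 dp.2 (hpre dp hmem) acc
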